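-- pv_equiv track=rewrite | github.com/hoangtang56/schedulling-sa | Schedulling SA.py | greedy_schedule
-- ===== SOURCE A (Python) =====
-- def calculate_makespan(jobs, schedule, num_machines):
--     job_task_idx = [0] * len(jobs) #Theo dõi bước hiện tại của mỗi job
--     machine_end = [0] * num_machines #Thời điểm kết thúc của mỗi máy
--     job_end = [0] * len(jobs) #Thời điểm kết thúc của mỗi job
--     gantt_data = [] #Dữ liệu vẽ biểu đồ Gantt
--     for idx, job_id in enumerate(schedule):
--         if job_task_idx[job_id] >= len(jobs[job_id]):
--             continue
--         machine, time = jobs[job_id][job_task_idx[job_id]]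
--         start = max(machine_end[machine], job_end[job_id])
--         end = start + time
--         machine_end[machine] = end
--         job_end[job_id] = end
--         gantt_data.append((machine, job_id, start, end, job_task_idx[job_id]))
--         job_task_idx[job_id] += 1
--     return max(machine_end), gantt_data
--
-- def greedy_schedule(jobs, num_machines):
--     """
--     Lịch tham lam: lần lượt bước 1, bước 2,… của từng Job (round-robin).
--     Trả về (schedule, makespan) – cùng format với SA.
--     """
--     max_steps = max(len(job) for job in jobs)
--     schedule = []
--     for step in range(max_steps):
--         for job_id, job in enumerate(jobs):
--             if step < len(job):
--                 schedule.append(job_id)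
--     makespan, _ = calculate_makespan(jobs, schedule, num_machines)
--     return schedule, makespan
-- ===== SOURCE B (Python) =====
-- def greedy_schedule(jobs, num_machines):
--     """
--     Round-robin greedy schedule, but the schedule construction and the
--     makespan simulation are fused into one nested loop: each emitted task
--     is simulated immediately, so no separate calculate_makespan pass,
--     no per-job task-index array and no gantt data are needed.
--     """
--     max_steps = max(len(job) for job in jobs)
--     machine_end = [0] * num_machines
--     job_end = [0] * len(jobs)
--     schedule = []
--     for step in range(max_steps):
--         for job_id, job in enumerate(jobs):
--             if step < len(job):
--                 schedule.append(job_id)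
--                 machine, time = job[step]
--                 start = max(machine_end[machine], job_end[job_id])
--                 end = start + time
--                 machine_end[machine] = end
--                 job_end[job_id] = end
--     return schedule, max(machine_end)
-- ===== Notes on version B (the rewrite author's own statement) =====
-- stated objective: simpler
-- what changed: Fused the schedule construction and the makespan simulation into one nested step/job loop that simulates each task as it is emitted, eliminating the separate calculate_makespan pass, the job_task_idx bookkeeping array and the unused gantt_data list.
import Mathlib
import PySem

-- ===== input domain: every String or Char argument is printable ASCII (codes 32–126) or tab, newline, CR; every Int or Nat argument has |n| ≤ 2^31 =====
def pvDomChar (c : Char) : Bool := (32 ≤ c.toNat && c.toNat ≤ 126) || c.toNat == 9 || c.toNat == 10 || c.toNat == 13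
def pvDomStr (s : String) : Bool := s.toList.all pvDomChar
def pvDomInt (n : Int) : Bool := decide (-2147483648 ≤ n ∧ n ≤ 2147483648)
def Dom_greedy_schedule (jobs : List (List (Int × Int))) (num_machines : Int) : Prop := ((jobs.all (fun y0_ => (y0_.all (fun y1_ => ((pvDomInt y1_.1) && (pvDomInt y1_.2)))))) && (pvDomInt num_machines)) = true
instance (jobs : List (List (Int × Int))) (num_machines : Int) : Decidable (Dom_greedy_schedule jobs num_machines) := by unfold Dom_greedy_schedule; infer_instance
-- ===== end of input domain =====

-- B fuses A's two passes (build schedule, then simulate it) into one nested loop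
-- simulating each task as it is emitted; equal return value proved on Pre_.

-- ===== PORT A =====
-- one iteration of calculate_makespan's loop over `schedule`; state = (job_task_idx, machine_end, job_end, gantt_data).
-- pyGetD/pySetD with default are exact under Pre_ (every index taken is Python-valid there).
def pvCMStep (jobs : List (List (Int × Int)))
    (st : List Int × List Int × List Int × List (Int × Int × Int × Int × Int)) (job_id : Int) :
    List Int × List Int × List Int × List (Int × Int × Int × Int × Int) :=
  let job := PySem.List.pyGetD jobs job_id []
  let ti := PySem.List.pyGetD st.1 job_id 0
  if (job.length : Int) ≤ ti then st
  else
    let mt := PySem.List.pyGetD job ti (0, 0)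
    let start := max (PySem.List.pyGetD st.2.1 mt.1 0) (PySem.List.pyGetD st.2.2.1 job_id 0)
    let e := start + mt.2
    (PySem.List.pySetD st.1 job_id (ti + 1),
     PySem.List.pySetD st.2.1 mt.1 e,
     PySem.List.pySetD st.2.2.1 job_id e,
     st.2.2.2 ++ [(mt.1, job_id, start, e, ti)])

def calculate_makespan (jobs : List (List (Int × Int))) (schedule : List Int) (num_machines : Int) :
    Int × List (Int × Int × Int × Int × Int) :=
  let st := schedule.foldl (pvCMStep jobs)
    (List.replicate jobs.length 0, List.replicate num_machines.toNat 0, List.replicate jobs.length 0, [])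
  ((PySem.List.max? st.2.1 (fun x => x)).getD 0, st.2.2.2)  -- max(machine_end): nonempty under Pre_

def greedy_schedule (jobs : List (List (Int × Int))) (num_machines : Int) : List Int × Int :=
  let max_steps := (PySem.List.max? (jobs.map (fun job => (job.length : Int))) (fun x => x)).getD 0
  let schedule := (PySem.List.pyRange 0 max_steps 1).foldl
    (fun sch step => (PySem.List.enumerate jobs 0).foldl
      (fun sch2 p => if step < (p.2.length : Int) then sch2 ++ [p.1] else sch2) sch) []
  (schedule, (calculate_makespan jobs schedule num_machines).1)

-- ===== PORT B =====
-- one inner-loop body of B: emit job_id and simulate its task of index `step` at once; state = (schedule, machine_end, job_end).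
def pvSimJob (step : Int) (st : List Int × List Int × List Int) (p : Int × List (Int × Int)) :
    List Int × List Int × List Int :=
  if step < (p.2.length : Int) then
    let mt := PySem.List.pyGetD p.2 step (0, 0)
    let start := max (PySem.List.pyGetD st.2.1 mt.1 0) (PySem.List.pyGetD st.2.2 p.1 0)
    let e := start + mt.2
    (st.1 ++ [p.1], PySem.List.pySetD st.2.1 mt.1 e, PySem.List.pySetD st.2.2 p.1 e)
  else st

def greedy_schedule_alt (jobs : List (List (Int × Int))) (num_machines : Int) : List Int × Int :=
  let max_steps := (PySem.List.max? (jobs.map (fun job => (job.length : Int))) (fun x => x)).getD 0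
  let st := (PySem.List.pyRange 0 max_steps 1).foldl
    (fun st step => (PySem.List.enumerate jobs 0).foldl (pvSimJob step) st)
    ([], List.replicate num_machines.toNat 0, List.replicate jobs.length 0)
  (st.1, (PySem.List.max? st.2.1 (fun x => x)).getD 0)

-- ===== PRECONDITION & SPEC =====
-- Pre_ excludes exactly the inputs where the Python A raises: empty `jobs` (ValueError from max()),
-- num_machines < 1 (max() of the empty machine_end list), and any task whose machine index is outside
-- Python's valid (wraparound-inclusive) range [-num_machines, num_machines) (IndexError).
def Pre_greedy_schedule (jobs : List (List (Int × Int))) (num_machines : Int) : Prop :=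
  jobs ≠ [] ∧ 1 ≤ num_machines ∧
    ∀ job ∈ jobs, ∀ p ∈ job, -num_machines ≤ p.1 ∧ p.1 < num_machines
instance (jobs : List (List (Int × Int))) (num_machines : Int) : Decidable (Pre_greedy_schedule jobs num_machines) := by unfold Pre_greedy_schedule; infer_instance
def pvWitness_greedy_schedule : (List (List (Int × Int))) × Int := ([[(0, 3), (1, 2)], [(1, 4)]], 2)

def Spec_greedy_schedule (jobs : List (List (Int × Int))) (num_machines : Int) (out : List Int × Int) : Prop := out = greedy_schedule_alt jobs num_machines
instance (jobs : List (List (Int × Int))) (num_machines : Int) (out : List Int × Int) : Decidable (Spec_greedy_schedule jobs num_machines out) := by unfold Spec_greedy_schedule; infer_instance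

-- ===== CLAIM (what is proved, stated in full; the proofs are below) =====
def Claim_equal_greedy_schedule : Prop := ∀ (jobs : List (List (Int × Int))) (num_machines : Int), Dom_greedy_schedule jobs num_machines → Pre_greedy_schedule jobs num_machines → Spec_greedy_schedule jobs num_machines (greedy_schedule jobs num_machines)

-- ===== LEMMAS AND PROOFS =====

def pvJti (s : Int) (l : List (List (Int × Int))) : List Int :=
  l.map (fun j => min s (j.length : Int))

theorem pvJti_cons (s : Int) (x : List (Int × Int)) (xs : List (List (Int × Int))) :
    pvJti s (x :: xs) = min s (x.length : Int) :: pvJti s xs := rfl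

theorem pvJti_append (s : Int) (l1 l2 : List (List (Int × Int))) :
    pvJti s (l1 ++ l2) = pvJti s l1 ++ pvJti s l2 := by simp [pvJti]

theorem pvJti_length (s : Int) (l : List (List (Int × Int))) :
    (pvJti s l).length = l.length := by simp [pvJti]

theorem pvJti_zero : ∀ l, pvJti 0 l = List.replicate l.length 0
  | [] => rfl
  | x :: xs => by simp [pvJti_cons, pvJti_zero xs, List.replicate_succ]

theorem pv_getD_mid {α : Type} (l1 : List α) (x : α) (l2 : List α) (d : α) (i : Int)
    (h : i = (l1.length : Int)) : PySem.List.pyGetD (l1 ++ x :: l2) i d = x := by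
  subst h
  rw [PySem.List.pyGetD_natCast]
  simp [List.getD]

theorem pv_setD_mid {α : Type} (l1 : List α) (x : α) (l2 : List α) (v : α) (i : Int)
    (h : i = (l1.length : Int)) : PySem.List.pySetD (l1 ++ x :: l2) i v = l1 ++ v :: l2 := by
  subst h
  rw [PySem.List.pySetD_natCast]
  simp

def pvBlock (s : Int) (suf : List (List (Int × Int))) (k : Int) : List Int :=
  (PySem.List.enumerate suf k).foldl
    (fun sch2 p => if s < (p.2.length : Int) then sch2 ++ [p.1] else sch2) []

theorem pvBlock_acc (s : Int) :
    ∀ (suf : List (List (Int × Int))) (k : Int) (sch : List Int),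
      (PySem.List.enumerate suf k).foldl
        (fun sch2 p => if s < (p.2.length : Int) then sch2 ++ [p.1] else sch2) sch
      = sch ++ pvBlock s suf k
  | [], k, sch => by simp [pvBlock, PySem.List.enumerate_nil]
  | x :: xs, k, sch => by
      simp only [pvBlock, PySem.List.enumerate_cons, List.foldl_cons]
      rw [pvBlock_acc s xs (k+1), pvBlock_acc s xs (k+1)]
      split_ifs <;> simp

theorem pvBlock_cons (s : Int) (x : List (Int × Int)) (xs : List (List (Int × Int))) (k : Int) :
    pvBlock s (x :: xs) k
      = (if s < (x.length : Int) then [k] else []) ++ pvBlock s xs (k+1) := by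
  simp only [pvBlock, PySem.List.enumerate_cons, List.foldl_cons]
  rw [pvBlock_acc]
  split_ifs <;> simp [pvBlock]

-- one hit of A's makespan step at the round-robin position = B's fused step (modulo gantt)
theorem pvStep_one (pre : List (List (Int × Int))) (x : List (Int × Int))
    (xs : List (List (Int × Int))) (s : Int) (hsx : s < (x.length : Int))
    (me je sch : List Int) (g : List (Int × Int × Int × Int × Int)) :
    pvCMStep (pre ++ x :: xs)
        (pvJti (s+1) pre ++ min s (x.length : Int) :: pvJti s xs, me, je, g) ((pre.length : Int))
      = (pvJti (s+1) pre ++ min (s+1) (x.length : Int) :: pvJti s xs,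
         (pvSimJob s (sch, me, je) ((pre.length : Int), x)).2.1,
         (pvSimJob s (sch, me, je) ((pre.length : Int), x)).2.2,
         g ++ [((PySem.List.pyGetD x s (0,0)).1, (pre.length : Int),
                max (PySem.List.pyGetD me (PySem.List.pyGetD x s (0,0)).1 0)
                    (PySem.List.pyGetD je (pre.length : Int) 0),
                max (PySem.List.pyGetD me (PySem.List.pyGetD x s (0,0)).1 0)
                    (PySem.List.pyGetD je (pre.length : Int) 0)
                  + (PySem.List.pyGetD x s (0,0)).2, s)]) := by
  have hmin : min s (x.length : Int) = s := min_eq_left (le_of_lt hsx)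
  have hmin1 : min (s+1) (x.length : Int) = s + 1 := min_eq_left (by omega)
  simp only [pvCMStep, pvSimJob, hmin, hmin1, pv_getD_mid pre x xs [] _ rfl, if_pos hsx]
  simp only [pv_getD_mid (pvJti (s+1) pre) s (pvJti s xs) 0 _ (by rw [pvJti_length])]
  simp only [if_neg (by omega : ¬ ((x.length : Int) ≤ s))]
  simp only [pv_setD_mid (pvJti (s+1) pre) s (pvJti s xs) (s+1) _ (by rw [pvJti_length])]

theorem pvStep_agree (s : Int) (hs : 0 ≤ s) :
    ∀ (suf pre : List (List (Int × Int))) (me je sch : List Int)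
      (g : List (Int × Int × Int × Int × Int)),
      (∃ g', (pvBlock s suf ((pre.length : Int))).foldl (pvCMStep (pre ++ suf))
              (pvJti (s+1) pre ++ pvJti s suf, me, je, g)
            = (pvJti (s+1) (pre ++ suf),
               ((PySem.List.enumerate suf ((pre.length : Int))).foldl (pvSimJob s) (sch, me, je)).2.1,
               ((PySem.List.enumerate suf ((pre.length : Int))).foldl (pvSimJob s) (sch, me, je)).2.2, g'))
      ∧ ((PySem.List.enumerate suf ((pre.length : Int))).foldl (pvSimJob s) (sch, me, je)).1
          = sch ++ pvBlock s suf ((pre.length : Int))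
  | [], pre, me, je, sch, g => by
      refine ⟨⟨g, ?_⟩, ?_⟩ <;> simp [pvBlock, PySem.List.enumerate_nil, pvJti]
  | x :: xs, pre, me, je, sch, g => by
      have hpx : (pre ++ [x]) ++ xs = pre ++ x :: xs := by simp
      have hlen : (((pre ++ [x]).length : Nat) : Int) = (pre.length : Int) + 1 := by
        simp [List.length_append]
      have hjx : pvJti (s+1) (pre ++ [x]) ++ pvJti s xs
          = pvJti (s+1) pre ++ min (s+1) (x.length : Int) :: pvJti s xs := by
        rw [pvJti_append]; simp [pvJti]
      rw [pvBlock_cons, PySem.List.enumerate_cons]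
      by_cases hsx : s < (x.length : Int)
      · rw [if_pos hsx]
        simp only [List.cons_append, List.nil_append, List.foldl_cons, pvJti_cons]
        obtain hone := pvStep_one pre x xs s hsx me je sch g
        rw [hone]
        set q := pvSimJob s (sch, me, je) ((pre.length : Int), x) with hq
        have hq1 : q.1 = sch ++ [(pre.length : Int)] := by
          rw [hq]; simp [pvSimJob, if_pos hsx]
        have hqfull : q = (sch ++ [(pre.length : Int)], q.2.1, q.2.2) := by
          conv_lhs => rw [show q = (q.1, q.2.1, q.2.2) from rfl]
          rw [hq1]
        obtain ⟨⟨g', hA⟩, hsch⟩ := pvStep_agree s hs xs (pre ++ [x]) q.2.1 q.2.2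
          (sch ++ [(pre.length : Int)])
          (g ++ [((PySem.List.pyGetD x s (0,0)).1, (pre.length : Int),
                max (PySem.List.pyGetD me (PySem.List.pyGetD x s (0,0)).1 0)
                    (PySem.List.pyGetD je (pre.length : Int) 0),
                max (PySem.List.pyGetD me (PySem.List.pyGetD x s (0,0)).1 0)
                    (PySem.List.pyGetD je (pre.length : Int) 0)
                  + (PySem.List.pyGetD x s (0,0)).2, s)])
        rw [hpx, hjx] at hA
        rw [hlen] at hA hsch
        rw [hqfull]
        refine ⟨⟨g', hA⟩, ?_⟩
        rw [hsch]
        simp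
      · rw [if_neg hsx]
        have hmm : min s (x.length : Int) = min (s+1) (x.length : Int) := by omega
        have hB0 : pvSimJob s (sch, me, je) ((pre.length : Int), x) = (sch, me, je) := by
          simp [pvSimJob, if_neg hsx]
        simp only [List.nil_append, List.foldl_cons, pvJti_cons, hmm, hB0]
        obtain ⟨⟨g', hA⟩, hsch⟩ := pvStep_agree s hs xs (pre ++ [x]) me je sch g
        rw [hpx, hjx] at hA
        rw [hlen] at hA hsch
        exact ⟨⟨g', hA⟩, hsch⟩

theorem pvOuter (jobs : List (List (Int × Int))) (nm0 n0 : List Int) :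
    ∀ (t : Nat),
      (∃ g', ((List.range t).foldl
               (fun sch (k : Nat) => (PySem.List.enumerate jobs 0).foldl
                 (fun sch2 p => if (k : Int) < (p.2.length : Int) then sch2 ++ [p.1] else sch2) sch) []).foldl
               (pvCMStep jobs) (pvJti 0 jobs, nm0, n0, [])
            = (pvJti (t : Int) jobs,
               ((List.range t).foldl (fun st (k : Nat) => (PySem.List.enumerate jobs 0).foldl (pvSimJob (k : Int)) st) ([], nm0, n0)).2.1,
               ((List.range t).foldl (fun st (k : Nat) => (PySem.List.enumerate jobs 0).foldl (pvSimJob (k : Int)) st) ([], nm0, n0)).2.2, g'))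
      ∧ ((List.range t).foldl (fun st (k : Nat) => (PySem.List.enumerate jobs 0).foldl (pvSimJob (k : Int)) st) ([], nm0, n0)).1
          = (List.range t).foldl
               (fun sch (k : Nat) => (PySem.List.enumerate jobs 0).foldl
                 (fun sch2 p => if (k : Int) < (p.2.length : Int) then sch2 ++ [p.1] else sch2) sch) []
  | 0 => by refine ⟨⟨[], ?_⟩, ?_⟩ <;> simp
  | Nat.succ t => by
      obtain ⟨⟨g', hA⟩, hsch⟩ := pvOuter jobs nm0 n0 t
      set schT := (List.range t).foldl
               (fun sch (k : Nat) => (PySem.List.enumerate jobs 0).foldl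
                 (fun sch2 p => if (k : Int) < (p.2.length : Int) then sch2 ++ [p.1] else sch2) sch) [] with hschT
      set BfT := (List.range t).foldl (fun st (k : Nat) => (PySem.List.enumerate jobs 0).foldl (pvSimJob (k : Int)) st) ([], nm0, n0) with hBfT
      obtain ⟨⟨g'', hstep⟩, hblk⟩ := pvStep_agree (t : Int) (by positivity) jobs [] BfT.2.1 BfT.2.2 BfT.1 g'
      simp only [List.length_nil, Nat.cast_zero, List.nil_append, pvJti, List.map_nil] at hstep hblk
      rw [List.range_succ, List.foldl_append, List.foldl_append]
      simp only [List.foldl_cons, List.foldl_nil]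
      rw [← hschT, ← hBfT]
      rw [pvBlock_acc (t : Int) jobs 0 schT, List.foldl_append, hA]
      have hBe : (BfT.1, BfT.2.1, BfT.2.2) = BfT := rfl
      rw [hBe] at hstep hblk
      constructor
      · refine ⟨g'', ?_⟩
        simp only [pvJti]
        push_cast at hstep ⊢
        exact hstep
      · rw [hblk, hsch]

theorem greedy_eq (jobs : List (List (Int × Int))) (num_machines : Int) :
    greedy_schedule jobs num_machines = greedy_schedule_alt jobs num_machines := by
  simp only [greedy_schedule, greedy_schedule_alt, calculate_makespan,
    PySem.List.pyRange_one, List.foldl_map, zero_add, sub_zero]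
  rw [← pvJti_zero jobs]
  obtain ⟨⟨g', hA⟩, hsch⟩ := pvOuter jobs (List.replicate num_machines.toNat 0) (pvJti 0 jobs)
    (((PySem.List.max? (jobs.map (fun (job : List (Int × Int)) => (job.length : Int))) (fun x => x)).getD 0).toNat)
  rw [hA, ← hsch]

-- ===== VERDICT (by name: the statement is the Claim_ definition above) =====
theorem greedy_schedule_spec : Claim_equal_greedy_schedule := by
  intro jobs num_machines _ _
  show greedy_schedule jobs num_machines = greedy_schedule_alt jobs num_machines
  exact greedy_eq jobs num_machines
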